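-- pv_equiv track=rewrite | github.com/anika-ilieva/ENOIESC | thesis/helpers/PostprocessHelper.py | get_conj_term_map
-- ===== SOURCE A (Python) =====
-- def get_conj_term_map(conj_expr_offsets):
--   conj_terms = []
--   conj_conj_term_map = {}
--
--   for i, conj_expr in enumerate(conj_expr_offsets):
--     conj_term_ids = []
--     for conj_term in conj_expr:
--       conj_term_ids.append(len(conj_terms))
--       conj_terms.append(conj_term)
--     conj_conj_term_map[i] = conj_term_ids
--   return conj_terms, conj_conj_term_map
-- ===== SOURCE B (Python) =====
-- def get_conj_term_map(conj_expr_offsets):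
--   # Back-to-front recursion: solve the tail first, then prepend the first group
--   # and shift every term id of the tail's map by len(first group).
--   def go(groups):
--     if not groups:
--       return [], {}
--     first, rest = groups[0], groups[1:]
--     terms_rest, map_rest = go(rest)
--     k = len(first)
--     terms = first + terms_rest
--     cmap = {0: list(range(k))}
--     for i, ids in map_rest.items():
--       cmap[i + 1] = [t + k for t in ids]
--     return terms, cmap
--   return go(conj_expr_offsets)
-- ===== Notes on version B (the rewrite author's own statement) =====
-- stated objective: alternative
-- what changed: Replaced A's forward single-pass accumulation (global counter, per-element appends into a shared flat list) by a back-to-front recursion: solve the tail, then prepend the first group and renumber the tail's id lists by shifting them with the first group's length.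
import Mathlib
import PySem

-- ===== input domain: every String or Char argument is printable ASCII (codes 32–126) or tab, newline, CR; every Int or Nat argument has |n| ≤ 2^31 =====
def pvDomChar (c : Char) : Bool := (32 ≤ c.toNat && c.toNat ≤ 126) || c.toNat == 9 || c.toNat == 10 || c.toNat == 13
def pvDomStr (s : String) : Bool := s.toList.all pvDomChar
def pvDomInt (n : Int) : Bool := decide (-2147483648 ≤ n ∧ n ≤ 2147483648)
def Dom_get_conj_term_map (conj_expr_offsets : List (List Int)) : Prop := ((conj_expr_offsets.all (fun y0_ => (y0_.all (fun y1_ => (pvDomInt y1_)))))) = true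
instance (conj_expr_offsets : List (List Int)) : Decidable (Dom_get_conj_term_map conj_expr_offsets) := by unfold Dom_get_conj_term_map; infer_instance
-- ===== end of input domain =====

-- B replaces A's forward single-pass accumulation by a back-to-front recursion that
-- solves the tail first and renumbers its id lists by shifting (alternative decomposition).

-- ===== PORT A =====
-- inner loop: for conj_term in conj_expr: ids.append(len(terms)); terms.append(conj_term)
def pvInnerA (conj_expr : List Int) (terms ids : List Int) : List Int × List Int :=
  match conj_expr with
  | [] => (terms, ids)
  | t :: rest => pvInnerA rest (terms ++ [t]) (ids ++ [(terms.length : Int)])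

-- outer loop over enumerate(conj_expr_offsets)
def pvOuterA (groups : List (List Int)) (i : Int) (terms : List Int)
    (m : PySem.Dict Int (List Int)) : List Int × (List (Int × List Int)) :=
  match groups with
  | [] => (terms, m.items)
  | g :: rest =>
    let (terms', ids) := pvInnerA g terms []
    pvOuterA rest (i + 1) terms' (m.insert i ids)

def get_conj_term_map (conj_expr_offsets : List (List Int)) : List Int × (List (Int × List Int)) :=
  pvOuterA conj_expr_offsets 0 [] PySem.Dict.empty

-- ===== PORT B =====
-- def go(groups): if not groups: return [], {}
--   first, rest = groups[0], groups[1:]; terms_rest, map_rest = go(rest); k = len(first)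
--   terms = first + terms_rest; cmap = {0: list(range(k))}
--   for i, ids in map_rest.items(): cmap[i + 1] = [t + k for t in ids]
--   return terms, cmap
def pvGoB (groups : List (List Int)) : List Int × PySem.Dict Int (List Int) :=
  match groups with
  | [] => ([], PySem.Dict.empty)
  | first :: rest =>
    let (terms_rest, map_rest) := pvGoB rest
    let k : Int := first.length
    let terms := first ++ terms_rest
    let cmap0 := PySem.Dict.empty.insert 0 (PySem.List.pyRange 0 k 1)
    let cmap := map_rest.items.foldl
      (fun d p => d.insert (p.1 + 1) (p.2.map (fun t => t + k))) cmap0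
    (terms, cmap)

def get_conj_term_map_alt (conj_expr_offsets : List (List Int)) : List Int × (List (Int × List Int)) :=
  let (terms, cmap) := pvGoB conj_expr_offsets
  (terms, cmap.items)

-- ===== PRECONDITION & SPEC =====
def Spec_get_conj_term_map (conj_expr_offsets : List (List Int)) (out : List Int × (List (Int × List Int))) : Prop := out = get_conj_term_map_alt conj_expr_offsets
instance (conj_expr_offsets : List (List Int)) (out : List Int × (List (Int × List Int))) : Decidable (Spec_get_conj_term_map conj_expr_offsets out) := by unfold Spec_get_conj_term_map; infer_instance

-- ===== CLAIM (what is proved, stated in full; the proofs are below) =====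
def Claim_equal_get_conj_term_map : Prop := ∀ (conj_expr_offsets : List (List Int)), Dom_get_conj_term_map conj_expr_offsets → Spec_get_conj_term_map conj_expr_offsets (get_conj_term_map conj_expr_offsets)

-- ===== LEMMAS AND PROOFS =====

-- common specification of the group-index → id-list map: group j gets the ids
-- [off + Σ lengths before j, …) as a range
def pvMapSpec : List (List Int) → Int → Int → List (Int × List Int)
  | [], _, _ => []
  | g :: rest, i, off =>
    (i, PySem.List.pyRange off (off + g.length) 1) :: pvMapSpec rest (i + 1) (off + g.length)

theorem pvMapSpec_keys (groups : List (List Int)) (i off : Int) :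
    (pvMapSpec groups i off).map Prod.fst = PySem.List.pyRange i (i + groups.length) 1 := by
  induction groups generalizing i off with
  | nil =>
    simp [pvMapSpec, PySem.List.pyRange_one_eq_nil (le_refl i)]
  | cons g rest ih =>
    rw [PySem.List.pyRange_one_cons
      (show i < i + ((g :: rest).length : Int) by simp only [List.length_cons]; push_cast; omega)]
    simp only [pvMapSpec, List.map_cons, ih]
    congr 2
    simp only [List.length_cons]
    push_cast
    ring

theorem pyRange_shift (a b k : Int) :
    PySem.List.pyRange (a + k) (b + k) 1 = (PySem.List.pyRange a b 1).map (fun t => t + k) := by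
  rw [PySem.List.pyRange_one, PySem.List.pyRange_one]
  have : (b + k - (a + k)) = b - a := by ring
  rw [this, List.map_map]
  apply List.map_congr_left; intro j _; simp [Function.comp]; ring

theorem pvMapSpec_shift (groups : List (List Int)) (i off k : Int) :
    pvMapSpec groups (i + 1) (off + k) =
      (pvMapSpec groups i off).map (fun p => (p.1 + 1, p.2.map (fun t => t + k))) := by
  induction groups generalizing i off with
  | nil => rfl
  | cons g rest ih =>
    simp only [pvMapSpec, List.map_cons, List.cons.injEq, Prod.mk.injEq, true_and]
    refine ⟨?_, ?_⟩
    · rw [← pyRange_shift]; congr 1; ring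
    · have := ih (i + 1) (off + g.length)
      rw [show off + k + (g.length : Int) = off + (g.length : Int) + k by ring, this]

-- A's inner loop appends the group and records the consecutive indices starting at terms.length.
theorem pvInnerA_eq (g : List Int) (terms ids : List Int) :
    pvInnerA g terms ids =
      (terms ++ g, ids ++ PySem.List.pyRange (terms.length : Int) ((terms.length : Int) + g.length) 1) := by
  induction g generalizing terms ids with
  | nil =>
    rw [PySem.List.pyRange_one_eq_nil (show ((terms.length : Int) + ([] : List Int).length) ≤ (terms.length : Int) by simp)]
    simp [pvInnerA]
  | cons t rest ih =>
    rw [pvInnerA, ih,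
      PySem.List.pyRange_one_cons (show (terms.length : Int) < (terms.length : Int) + (((t :: rest) : List Int).length : Int) by simp)]
    simp [Prod.ext_iff]
    congr 1
    ring

-- A's outer loop flattens the groups and produces pvMapSpec, as long as all keys of m are < i.
theorem pvOuterA_char (groups : List (List Int)) (i : Int) (terms : List Int)
    (m : PySem.Dict Int (List Int)) (h : ∀ k ∈ m.keys, k < i) :
    pvOuterA groups i terms m =
      (terms ++ groups.flatten, m.items ++ pvMapSpec groups i (terms.length : Int)) := by
  induction groups generalizing i terms m with
  | nil => simp [pvOuterA, pvMapSpec]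
  | cons g rest ih =>
    rw [pvOuterA, pvInnerA_eq]
    dsimp only
    have hni : m.contains i = false := by
      rw [PySem.Dict.contains_eq_decide_mem_keys]
      simp only [decide_eq_false_iff_not]
      intro hmem; exact absurd (h i hmem) (lt_irrefl i)
    have h' : ∀ k ∈ (m.insert i ([] ++ PySem.List.pyRange (terms.length : Int) ((terms.length : Int) + g.length) 1)).keys, k < i + 1 := by
      intro k hk
      rcases (PySem.Dict.mem_keys_insert _ _ _ _).1 hk with rfl | hk
      · omega
      · have := h k hk; omega
    rw [ih (i + 1) (terms ++ g) _ h',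
      show (((terms ++ g).length : Nat) : Int) = (terms.length : Int) + (g.length : Int) by
        simp only [List.length_append]; push_cast; ring,
      PySem.Dict.items_insert_of_not_contains _ _ hni]
    simp [pvMapSpec, List.append_assoc]

-- B's recursion computes the same pair (flatten, pvMapSpec · 0 0).
theorem pvGoB_char (groups : List (List Int)) :
    (pvGoB groups).1 = groups.flatten ∧ (pvGoB groups).2.items = pvMapSpec groups 0 0 := by
  induction groups with
  | nil => exact ⟨rfl, rfl⟩
  | cons first rest ih =>
    obtain ⟨ih1, ih2⟩ := ih
    rcases hE : pvGoB rest with ⟨tr, mr⟩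
    rw [hE] at ih1 ih2
    simp only at ih1 ih2
    simp only [pvGoB, hE]
    refine ⟨by rw [ih1, List.flatten_cons], ?_⟩
    have hkeys : mr.items.map Prod.fst = PySem.List.pyRange 0 (rest.length : Int) 1 := by
      rw [ih2, pvMapSpec_keys]; congr 1; omega
    have hfresh : ∀ p ∈ mr.items,
        (PySem.Dict.empty.insert 0 (PySem.List.pyRange 0 (first.length : Int) 1)).contains (p.1 + 1) = false := by
      intro p hp
      have hp1 : p.1 ∈ mr.items.map Prod.fst := List.mem_map_of_mem hp
      rw [hkeys] at hp1
      have := PySem.List.mem_pyRange_one.1 hp1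
      rw [PySem.Dict.contains_insert]
      simp only [PySem.Dict.contains_empty, Bool.or_false, beq_eq_false_iff_ne, ne_eq]
      omega
    have hnd : (mr.items.map (fun p => p.1 + 1)).Nodup := by
      have heq : (mr.items.map (fun p => p.1 + 1)) = (mr.items.map Prod.fst).map (fun x => x + 1) := by
        rw [List.map_map]; rfl
      rw [heq, hkeys]
      exact List.Nodup.map (fun a b hab => by omega) (PySem.List.nodup_pyRange_one _ _)
    rw [PySem.Dict.items_foldl_insert_fresh _ _ _ _ hfresh hnd]
    rw [PySem.Dict.items_insert_of_not_contains _ _ (by simp)]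
    rw [ih2, ← pvMapSpec_shift rest 0 0 (first.length : Int)]
    simp [pvMapSpec, PySem.Dict.empty]

-- ===== VERDICT (by name: the statement is the Claim_ definition above) =====
theorem get_conj_term_map_spec : Claim_equal_get_conj_term_map := by
  intro xs _
  unfold Spec_get_conj_term_map get_conj_term_map get_conj_term_map_alt
  rw [pvOuterA_char xs 0 [] PySem.Dict.empty (by simp [PySem.Dict.keys_empty])]
  obtain ⟨h1, h2⟩ := pvGoB_char xs
  rcases hE : pvGoB xs with ⟨t, m⟩
  rw [hE] at h1 h2
  simp only at h1 h2
  dsimp only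
  rw [h1, h2]
  simp [PySem.Dict.empty]
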